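-- pv_equiv track=rewrite | github.com/Ghozali1712/Web-antivarian | aplikasi_laporan_penjualan_sqlite-1/app_prodsus.py | parse_prodsus
-- ===== SOURCE A (Python) =====
-- def parse_prodsus(text):
--     # Parsing sederhana, bisa dikembangkan sesuai kebutuhan
--     lines = text.split('\n')
--     data = []
--     current = {}
--     for line in lines:
--         if line.startswith('*') and line.endswith('*'):
--             if current:
--                 data.append(current)
--             current = {'Produk': line.strip('*').strip()}
--         elif ':' in line:
--             key, val = line.split(':', 1)
--             current[key.strip()] = val.strip()
--     if current:
--         data.append(current)
--     return data
-- ===== SOURCE B (Python) =====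
-- # B: different decomposition -- segment the lines back-to-front (fold from the right),
-- # then map each segment to a record and keep the non-empty ones.
--
-- def _is_header(line):
--     return line.startswith('*') and line.endswith('*')
--
--
-- def _record(header, body):
--     d = {} if header is None else {'Produk': header.strip('*').strip()}
--     for ln in body:
--         if ':' in ln:
--             k, v = ln.split(':', 1)
--             d[k.strip()] = v.strip()
--     return d
--
--
-- def parse_prodsus(text):
--     segs = []
--     body = []
--     for line in reversed(text.split('\n')):
--         if _is_header(line):
--             segs = [(line, body)] + segs
--             body = []
--         else:
--             body = [line] + body
--     records = [_record(None, body)] + [_record(h, b) for h, b in segs]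
--     return [r for r in records if r]
-- ===== Notes on version B (the rewrite author's own statement) =====
-- stated objective: alternative
-- what changed: A accumulates records in one left-to-right loop with a mutable current dict and flush-on-header/at-end; B instead folds the lines from the right into explicit (header, body) segments plus a leading body, maps each segment independently to its record dict, and keeps the non-empty ones.
import Mathlib
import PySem

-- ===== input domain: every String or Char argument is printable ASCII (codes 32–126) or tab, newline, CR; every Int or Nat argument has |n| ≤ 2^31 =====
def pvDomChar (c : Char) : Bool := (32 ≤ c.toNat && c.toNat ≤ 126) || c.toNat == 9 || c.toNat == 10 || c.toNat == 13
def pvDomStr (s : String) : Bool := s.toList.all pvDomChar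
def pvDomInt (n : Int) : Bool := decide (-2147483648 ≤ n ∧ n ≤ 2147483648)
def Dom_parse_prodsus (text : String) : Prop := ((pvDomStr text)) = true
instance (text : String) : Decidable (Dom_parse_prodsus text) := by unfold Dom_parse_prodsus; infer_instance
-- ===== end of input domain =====

-- B replaces A's single flush-style accumulation loop by a different decomposition:
-- segment the lines from the right, map each segment to a record, keep the non-empty
-- ones (objective: alternative; same cost).

-- ===== PORT A =====
-- one step of A's for-loop; state = (data, current)
def pvStepA (st : List (PySem.Dict String String) × PySem.Dict String String) (line : String) :
    List (PySem.Dict String String) × PySem.Dict String String :=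
  if PySem.Str.startswith line "*" && PySem.Str.endswith line "*" then
    ((if st.2.items.isEmpty then st.1 else st.1 ++ [st.2]),
     PySem.Dict.ofList [("Produk", PySem.Str.strip (PySem.Str.stripChars line "*"))])
  else if PySem.Str.isIn ":" line then
    match PySem.Str.splitMax? line ":" 1 with
    | some (k :: v :: _) => (st.1, st.2.insert (PySem.Str.strip k) (PySem.Str.strip v))
    | _ => (st.1, st.2)   -- unreachable: ':' is in line, so the split yields two pieces
  else (st.1, st.2)

def parse_prodsus (text : String) : List (List (String × String)) :=
  let lines := (PySem.Str.split? text "\n").getD []   -- sep "\n" ≠ "", so split? is `some`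
  let st := lines.foldl pvStepA ([], PySem.Dict.empty)
  (if st.2.items.isEmpty then st.1 else st.1 ++ [st.2]).map (·.items)

-- ===== PORT B =====
def pvIsHeader (line : String) : Bool :=
  PySem.Str.startswith line "*" && PySem.Str.endswith line "*"

-- the `for ln in body` loop of _record
def pvFill (d : PySem.Dict String String) (body : List String) : PySem.Dict String String :=
  body.foldl (fun d ln =>
    if PySem.Str.isIn ":" ln then
      match PySem.Str.splitMax? ln ":" 1 with
      | some (k :: v :: _) => d.insert (PySem.Str.strip k) (PySem.Str.strip v)
      | _ => d
    else d) d

-- _record: the dict of one segment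
def pvRecord (header : Option String) (body : List String) : PySem.Dict String String :=
  pvFill (match header with
    | none => PySem.Dict.empty
    | some h => PySem.Dict.ofList [("Produk", PySem.Str.strip (PySem.Str.stripChars h "*"))]) body

-- B's loop over reversed(lines) with prepend-only accumulators is a right fold
def pvSegments (lines : List String) : List (String × List String) × List String :=
  lines.foldr (fun line st =>
    if pvIsHeader line then ((line, st.2) :: st.1, [])
    else (st.1, line :: st.2)) ([], [])

def parse_prodsus_alt (text : String) : List (List (String × String)) :=
  let lines := (PySem.Str.split? text "\n").getD []
  let st := pvSegments lines
  let records := pvRecord none st.2 :: st.1.map (fun s => pvRecord (some s.1) s.2)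
  (records.filter (fun d => !d.items.isEmpty)).map (·.items)

-- ===== PRECONDITION & SPEC =====
def Spec_parse_prodsus (text : String) (out : List (List (String × String))) : Prop := out = parse_prodsus_alt text
instance (text : String) (out : List (List (String × String))) : Decidable (Spec_parse_prodsus text out) := by unfold Spec_parse_prodsus; infer_instance

-- ===== CLAIM (what is proved, stated in full; the proofs are below) =====
def Claim_equal_parse_prodsus : Prop := ∀ (text : String), Dom_parse_prodsus text → Spec_parse_prodsus text (parse_prodsus text)

-- ===== LEMMAS AND PROOFS =====

-- A's final flush, as a function of the loop state
def pvFinishA (st : List (PySem.Dict String String) × PySem.Dict String String) :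
    List (List (String × String)) :=
  (if st.2.items.isEmpty then st.1 else st.1 ++ [st.2]).map (·.items)

-- what B produces for a partially-filled current segment `c` followed by segments `segs`
def pvOut (c : PySem.Dict String String) (segs : List (String × List String)) (body : List String) :
    List (List (String × String)) :=
  ((pvFill c body :: segs.map (fun s => pvRecord (some s.1) s.2)).filter
      (fun d => !d.items.isEmpty)).map (·.items)

theorem pvSegments_cons (l : String) (ls : List String) :
    pvSegments (l :: ls) =
      if pvIsHeader l then ((l, (pvSegments ls).2) :: (pvSegments ls).1, [])
      else ((pvSegments ls).1, l :: (pvSegments ls).2) := by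
  simp [pvSegments]

theorem pvFill_cons (c : PySem.Dict String String) (l : String) (body : List String) :
    pvFill c (l :: body) = pvFill (pvFill c [l]) body := by
  simp [pvFill]

-- consuming one non-header line moves it into the fill state
theorem pvOut_cons_body (c : PySem.Dict String String) (segs : List (String × List String))
    (l : String) (body : List String) :
    pvOut c segs (l :: body) = pvOut (pvFill c [l]) segs body := by
  rw [pvOut, pvOut, pvFill_cons]

-- a header line flushes the current dict and opens a fresh segment
theorem pvOut_flush (c : PySem.Dict String String) (l : String)
    (segs : List (String × List String)) (body : List String) :
    pvOut c ((l, body) :: segs) [] =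
      (if c.items.isEmpty then ([] : List (List (String × String))) else [c.items]) ++
        pvOut (PySem.Dict.ofList [("Produk", PySem.Str.strip (PySem.Str.stripChars l "*"))])
          segs body := by
  by_cases h : c.items.isEmpty <;>
    simp [pvOut, pvFill, pvRecord, List.filter_cons, h]

theorem pv_key (lines : List String) :
    ∀ (data : List (PySem.Dict String String)) (c : PySem.Dict String String),
      pvFinishA (lines.foldl pvStepA (data, c))
        = data.map (·.items) ++ pvOut c (pvSegments lines).1 (pvSegments lines).2 := by
  induction lines with
  | nil =>
      intro data c
      by_cases h : c.items.isEmpty <;>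
        simp [pvFinishA, pvOut, pvFill, pvSegments, h]
  | cons l ls ih =>
      intro data c
      rw [List.foldl_cons]
      by_cases hh : (PySem.Str.startswith l "*" && PySem.Str.endswith l "*") = true
      · have hpt : pvIsHeader l = true := hh
        have hstep : pvStepA (data, c) l =
            ((if c.items.isEmpty then data else data ++ [c]),
             PySem.Dict.ofList [("Produk", PySem.Str.strip (PySem.Str.stripChars l "*"))]) := by
          simp only [pvStepA]; rw [if_pos hh]
        rw [hstep, ih, pvSegments_cons]
        simp only [hpt, if_pos]
        rw [pvOut_flush]
        by_cases h : c.items.isEmpty <;> simp [h]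
      · have hpf : pvIsHeader l = false := Bool.eq_false_iff.mpr hh
        have hstep : pvStepA (data, c) l = (data, pvFill c [l]) := by
          simp only [pvStepA, pvFill, List.foldl_cons, List.foldl_nil]
          rw [if_neg hh]
          by_cases hc : PySem.Str.isIn ":" l = true
          · rw [if_pos hc, if_pos hc]
            rcases hsp : PySem.Str.splitMax? l ":" 1 with _ | ⟨_ | ⟨k, _ | ⟨v, rest⟩⟩⟩ <;> rfl
          · rw [if_neg hc, if_neg hc]
        rw [hstep, ih, pvSegments_cons]
        simp only [hpf, Bool.false_eq_true, if_false]
        rw [pvOut_cons_body]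

-- ===== VERDICT (by name: the statement is the Claim_ definition above) =====
theorem parse_prodsus_spec : Claim_equal_parse_prodsus := by
  intro text _
  show parse_prodsus text = parse_prodsus_alt text
  have h := pv_key ((PySem.Str.split? text "\n").getD []) [] PySem.Dict.empty
  simp only [pvFinishA, List.map_nil, List.nil_append] at h
  simpa [parse_prodsus, parse_prodsus_alt, pvOut, pvRecord] using h
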